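-- pv_equiv track=rewrite | github.com/benquick123/code-profiling | code/batch-2/vse-naloge-brez-testov/DN6-Z-167.py | prvi_tvit
-- ===== SOURCE A (Python) =====
-- import collections
--
-- def avtor(tvit):
--     ime = ""
--     i=0
--     while tvit[i] != ":":
--         ime += tvit[i]
--         i+=1
--     return ime
--
-- def besedilo(tvit):
--     mesto = tvit.find(":")
--     tekst = tvit[mesto+2:]
--     return tekst
--
-- def prvi_tvit(tviti):
--     s =collections.defaultdict(list)
--     for tvit in tviti:
--         ime = avtor(tvit)
--         vsebina = besedilo(tvit)
--         if ime not in s: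
--             s[ime] = vsebina
--     return s
-- ===== SOURCE B (Python) =====
-- def prvi_tvit(tviti):
--     s = {}
--     for tvit in tviti:
--         i = tvit.index(":")
--         s.setdefault(tvit[:i], tvit[i + 2:])
--     return s
-- ===== Notes on version B (the rewrite author's own statement) =====
-- stated objective: idiomatic
-- what changed: Replaces the char-by-char avtor while-loop plus a separate find scan and the 'if ime not in s' guard with a single index(':') and two slices per tweet, stored via dict.setdefault.
import Mathlib
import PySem

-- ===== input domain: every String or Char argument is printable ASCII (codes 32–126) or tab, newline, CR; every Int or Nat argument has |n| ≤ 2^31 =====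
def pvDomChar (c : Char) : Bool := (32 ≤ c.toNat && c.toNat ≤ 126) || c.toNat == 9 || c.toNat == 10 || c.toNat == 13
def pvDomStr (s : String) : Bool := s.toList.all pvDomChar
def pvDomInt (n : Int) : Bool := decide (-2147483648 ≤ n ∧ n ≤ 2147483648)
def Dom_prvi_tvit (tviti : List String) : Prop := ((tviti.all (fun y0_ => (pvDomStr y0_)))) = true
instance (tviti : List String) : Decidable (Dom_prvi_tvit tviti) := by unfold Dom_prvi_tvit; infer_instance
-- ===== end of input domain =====

-- B parses each tweet with one index(':') and two slices, stored via dict.setdefault, instead of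
-- A's char-by-char author loop, separate find/slice and a membership guard (objective: idiomatic).


-- ===== PORT A =====
-- while tvit[i] != ":": ime += tvit[i]; i += 1   — walking the index i over the chars;
-- running off the end (no ':' in the tweet) is IndexError, hence Option (none = raise).
def pvAvtorGo : List Char → List Char → Option (List Char)
  | [], _ => none
  | c :: rest, acc => if c = ':' then some acc else pvAvtorGo rest (acc ++ [c])

def pvAvtor (tvit : String) : Option String :=
  (pvAvtorGo tvit.toList []).map String.ofList

def pvBesedilo (tvit : String) : String :=
  let mesto := PySem.Chars.find tvit.toList [':']
  String.ofList (PySem.List.slice tvit.toList (some (mesto + 2)) none)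

def prvi_tvit (tviti : List String) : List (String × String) :=
  (tviti.foldl (fun s tvit =>
    let ime := (pvAvtor tvit).getD ""   -- none = IndexError; those inputs are outside Pre_
    let vsebina := pvBesedilo tvit
    if s.contains ime then s else s.insert ime vsebina) (PySem.Dict.empty : PySem.Dict String String)).items

-- ===== PORT B =====
-- tvit.index(":") raises ValueError when ':' is absent (find = -1); those inputs are outside Pre_.
def prvi_tvit_alt (tviti : List String) : List (String × String) :=
  (tviti.foldl (fun s tvit =>
    let i := PySem.Chars.find tvit.toList [':']
    PySem.Dict.setdefault s (String.ofList (PySem.List.slice tvit.toList none (some i)))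
      (String.ofList (PySem.List.slice tvit.toList (some (i + 2)) none)))
    (PySem.Dict.empty : PySem.Dict String String)).items

-- ===== PRECONDITION & SPEC =====
-- Pre_: every tweet contains ':'; on a tweet without it A raises IndexError (and B ValueError).
def Pre_prvi_tvit (tviti : List String) : Prop := ∀ t ∈ tviti, ':' ∈ t.toList
instance (tviti : List String) : Decidable (Pre_prvi_tvit tviti) := by unfold Pre_prvi_tvit; infer_instance

def pvWitness_prvi_tvit : List String := ["ana: zdravo", "bine: hej", "ana: spet"]

def Spec_prvi_tvit (tviti : List String) (out : List (String × String)) : Prop := out = prvi_tvit_alt tviti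
instance (tviti : List String) (out : List (String × String)) : Decidable (Spec_prvi_tvit tviti out) := by unfold Spec_prvi_tvit; infer_instance

-- ===== CLAIM (what is proved, stated in full; the proofs are below) =====
def Claim_equal_prvi_tvit : Prop := ∀ (tviti : List String), Dom_prvi_tvit tviti → Pre_prvi_tvit tviti → Spec_prvi_tvit tviti (prvi_tvit tviti)

-- ===== LEMMAS AND PROOFS =====

lemma split_colon (cs : List Char) (h : ':' ∈ cs) :
    ∃ pre post, cs = pre ++ ':' :: post ∧ ':' ∉ pre := by
  induction cs with
  | nil => simp at h
  | cons c cs ih =>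
    by_cases hc : c = ':'
    · exact ⟨[], cs, by simp [hc], by simp⟩
    · have h' : ':' ∈ cs := by
        rcases List.mem_cons.mp h with h1 | h1
        · exact absurd h1.symm hc
        · exact h1
      obtain ⟨pre, post, h1, h2⟩ := ih h'
      exact ⟨c :: pre, post, by simp [h1], by
        simp [h2]; exact fun e => hc e.symm⟩

lemma pvAvtorGo_eq (pre post : List Char) (h : ':' ∉ pre) :
    ∀ acc, pvAvtorGo (pre ++ ':' :: post) acc = some (acc ++ pre) := by
  induction pre with
  | nil => intro acc; simp [pvAvtorGo]
  | cons c pre ih =>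
    intro acc
    have hc : c ≠ ':' := fun e => h (by simp [e])
    have h' : ':' ∉ pre := fun e => h (by simp [e])
    simp only [List.cons_append, pvAvtorGo, if_neg hc]
    rw [ih h']
    simp

lemma singleton_prefix_iff (a : Char) (l : List Char) :
    [a] <+: l ↔ ∃ t, l = a :: t := by
  constructor
  · rintro ⟨t, rfl⟩; exact ⟨t, rfl⟩
  · rintro ⟨t, rfl⟩; exact ⟨t, rfl⟩

lemma find_colon (pre post : List Char) (h : ':' ∉ pre) :
    PySem.Chars.find (pre ++ ':' :: post) [':'] = (pre.length : Int) := by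
  set cs := pre ++ ':' :: post with hcs
  have hinf : [':'] <:+: cs := ⟨pre, post, by simp [hcs]⟩
  have h0 : 0 ≤ PySem.Chars.find cs [':'] := (PySem.Chars.find_nonneg_iff cs [':']).mpr hinf
  obtain ⟨hpref, hmin⟩ := PySem.Chars.find_spec h0
  set n := (PySem.Chars.find cs [':']).toNat with hn
  have hne : n = pre.length := by
    rcases lt_trichotomy n pre.length with hlt | heq | hgt
    · exfalso
      obtain ⟨t, ht⟩ := (singleton_prefix_iff ':' (cs.drop n)).mp hpref
      have hget : cs[n]? = some ':' := by
        have := congrArg (fun l => l.head?) ht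
        simpa [List.head?_drop] using this
      have hn' : cs[n]? = pre[n]? := by
        rw [hcs, List.getElem?_append_left hlt]
      rw [hn'] at hget
      exact h (List.mem_of_getElem? hget)
    · exact heq
    · exfalso
      have hpl : [':'] <+: cs.drop pre.length := by
        rw [hcs, List.drop_left]
        exact ⟨post, rfl⟩
      exact hmin pre.length hgt hpl
  omega

lemma drop_two_append (pre post : List Char) :
    (pre ++ ':' :: post).drop (pre.length + 2) = post.drop 1 := by
  calc (pre ++ ':' :: post).drop (pre.length + 2)
      = ((pre ++ ':' :: post).drop pre.length).drop 2 := List.drop_drop.symm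
    _ = (':' :: post).drop 2 := by rw [List.drop_left]
    _ = post.drop 1 := rfl

lemma step_eq (s : PySem.Dict String String) (t : String) (h : ':' ∈ t.toList) :
    (let ime := (pvAvtor t).getD ""
     let vsebina := pvBesedilo t
     if s.contains ime then s else s.insert ime vsebina)
    = (let i := PySem.Chars.find t.toList [':']
       PySem.Dict.setdefault s (String.ofList (PySem.List.slice t.toList none (some i)))
         (String.ofList (PySem.List.slice t.toList (some (i + 2)) none))) := by
  obtain ⟨pre, post, hsplit, hnot⟩ := split_colon t.toList h
  show (if s.contains ((pvAvtor t).getD "") then s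
        else s.insert ((pvAvtor t).getD "") (pvBesedilo t))
      = PySem.Dict.setdefault s
          (String.ofList (PySem.List.slice t.toList none (some (PySem.Chars.find t.toList [':']))))
          (String.ofList (PySem.List.slice t.toList (some (PySem.Chars.find t.toList [':'] + 2)) none))
  have hime : pvAvtor t = some (String.ofList pre) := by
    unfold pvAvtor
    rw [hsplit, pvAvtorGo_eq _ _ hnot []]
    simp
  have htext : PySem.List.slice t.toList (some (PySem.Chars.find t.toList [':'] + 2)) none
      = post.drop 1 := by
    rw [hsplit, find_colon _ _ hnot,
      show (pre.length : Int) + 2 = ((pre.length + 2 : Nat) : Int) by push_cast; ring,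
      PySem.List.slice_from_natCast, drop_two_append]
  have hname : PySem.List.slice t.toList none (some (PySem.Chars.find t.toList [':'])) = pre := by
    rw [hsplit, find_colon _ _ hnot, PySem.List.slice_to_natCast, List.take_left]
  have hves : pvBesedilo t = String.ofList (post.drop 1) := by
    show String.ofList (PySem.List.slice t.toList (some (PySem.Chars.find t.toList [':'] + 2)) none)
        = String.ofList (post.drop 1)
    rw [htext]
  simp only [hime, hves, htext, hname, Option.getD_some]
  by_cases hc : s.contains (String.ofList pre)
  · rw [PySem.Dict.setdefault_of_contains s _ hc, if_pos hc]
  · rw [PySem.Dict.setdefault_of_not_contains s _ (by simpa using hc), if_neg hc]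

lemma fold_eq (tviti : List String) (hp : ∀ t ∈ tviti, ':' ∈ t.toList) :
    ∀ s : PySem.Dict String String,
    tviti.foldl (fun s tvit =>
      let ime := (pvAvtor tvit).getD ""
      let vsebina := pvBesedilo tvit
      if s.contains ime then s else s.insert ime vsebina) s
    = tviti.foldl (fun s tvit =>
      let i := PySem.Chars.find tvit.toList [':']
      PySem.Dict.setdefault s (String.ofList (PySem.List.slice tvit.toList none (some i)))
        (String.ofList (PySem.List.slice tvit.toList (some (i + 2)) none))) s := by
  induction tviti with
  | nil => intro s; rfl
  | cons t ts ih =>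
    intro s
    have ht : ':' ∈ t.toList := hp t (by simp)
    simp only [List.foldl_cons]
    rw [step_eq s t ht]
    exact ih (fun u hu => hp u (by simp [hu])) _

-- ===== VERDICT (by name: the statement is the Claim_ definition above) =====
theorem prvi_tvit_spec : Claim_equal_prvi_tvit := by
  intro tviti _hdom hpre
  unfold Spec_prvi_tvit prvi_tvit prvi_tvit_alt
  rw [fold_eq tviti hpre]
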